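-- pv_equiv track=rewrite | github.com/danvk/hybrid-boggle | make_boggle_dict.py | is_boggle_word
-- ===== SOURCE A (Python) =====
-- def is_boggle_word(word: str):
--     size = len(word)
--     if size < 3 or size > 17:
--         return False
--     for i, let in enumerate(word):
--         if let < "a" or let > "z":
--             return False
--         if let == "q" and (i + 1 >= size or word[i + 1] != "u"):
--             return False
--     return True
-- ===== SOURCE B (Python) =====
-- def is_boggle_word(word: str):
--     if not (3 <= len(word) <= 17):
--         return False
--     it = iter(word)
--     for c in it:
--         if c == "q":
--             if next(it, None) != "u":
--                 return False
--         elif not ("a" <= c <= "z"):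
--             return False
--     return True
-- ===== Notes on version B (the rewrite author's own statement) =====
-- stated objective: simpler
-- what changed: Replaces the index-based scan that peeks at word[i+1] for each 'q' with a tokenizer over an iterator that consumes 'qu' as one unit via next(), eliminating all index arithmetic.
import Mathlib
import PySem

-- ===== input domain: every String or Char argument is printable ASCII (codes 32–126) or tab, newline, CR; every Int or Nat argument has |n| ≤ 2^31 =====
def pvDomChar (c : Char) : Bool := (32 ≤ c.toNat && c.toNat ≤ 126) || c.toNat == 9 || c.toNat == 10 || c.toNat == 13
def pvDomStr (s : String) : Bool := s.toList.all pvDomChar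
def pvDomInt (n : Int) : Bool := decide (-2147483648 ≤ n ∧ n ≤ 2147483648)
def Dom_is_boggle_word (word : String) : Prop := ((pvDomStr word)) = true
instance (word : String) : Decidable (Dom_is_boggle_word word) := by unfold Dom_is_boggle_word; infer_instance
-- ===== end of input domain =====

-- B replaces A's index-peeking scan by a tokenizer that consumes 'qu' as one unit from an iterator (objective: simpler, no index arithmetic).

-- ===== PORT A =====
-- the for-loop over enumerate(word): i is the current index, rest the remaining characters
def pvALoop (word : List Char) (size : Nat) (i : Nat) : List Char → Bool
  | [] => true
  | c :: rest =>
    if c < 'a' ∨ 'z' < c then false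
    else if c = 'q' ∧ (size ≤ i + 1 ∨ PySem.List.pyGet? word ((i : Int) + 1) ≠ some 'u') then false
    else pvALoop word size (i + 1) rest

def is_boggle_word (word : String) : Bool :=
  let l := word.toList
  let size := l.length
  if size < 3 ∨ 17 < size then false
  else pvALoop l size 0 l

-- ===== PORT B =====
-- the for-loop over the iterator: a 'q' pulls the next character from the iterator itself
def pvBLoop : List Char → Bool
  | [] => true
  | c :: rest =>
    if c = 'q' then
      match rest with
      | [] => false
      | d :: r => if d = 'u' then pvBLoop r else false
    else if 'a' ≤ c ∧ c ≤ 'z' then pvBLoop rest else false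

def is_boggle_word_alt (word : String) : Bool :=
  if 3 ≤ word.toList.length ∧ word.toList.length ≤ 17 then pvBLoop word.toList else false

-- ===== PRECONDITION & SPEC =====
def Spec_is_boggle_word (word : String) (out : Bool) : Prop := out = is_boggle_word_alt word
instance (word : String) (out : Bool) : Decidable (Spec_is_boggle_word word out) := by unfold Spec_is_boggle_word; infer_instance

-- ===== CLAIM (what is proved, stated in full; the proofs are below) =====
def Claim_equal_is_boggle_word : Prop := ∀ (word : String), Dom_is_boggle_word word → Spec_is_boggle_word word (is_boggle_word word)

-- ===== LEMMAS AND PROOFS =====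

lemma pvBLoop_cons (c : Char) (rest : List Char) :
    pvBLoop (c :: rest) =
      (if c = 'q' then
        match rest with
        | [] => false
        | d :: r => if d = 'u' then pvBLoop r else false
      else if 'a' ≤ c ∧ c ≤ 'z' then pvBLoop rest else false) := by
  cases rest <;> rfl

lemma pvLoop_eq (w : List Char) : ∀ (rest : List Char) (i : Nat), w.drop i = rest →
    pvALoop w w.length i rest = pvBLoop rest := by
  intro rest
  induction rest with
  | nil => intro i _; rfl
  | cons c r ih =>
    intro i hdrop
    have hlen : w.length - i = r.length + 1 := by
      have := List.length_drop (l := w) (i := i)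
      rw [hdrop] at this; simpa using this.symm
    have hdrop' : w.drop (i + 1) = r := by
      have : (w.drop i).tail = w.drop (i + 1) := by
        simpa using (List.tail_drop w i).symm ▸ rfl
      rw [hdrop] at this; simpa using this.symm
    have hget : PySem.List.pyGet? w ((i : Int) + 1) = r.head? := by
      have h1 : ((i : Int) + 1) = ((i + 1 : Nat) : Int) := by push_cast; ring
      rw [h1, PySem.List.pyGet?_natCast]
      rw [← List.head?_drop, hdrop']
    by_cases hq : c = 'q'
    · subst hq
      cases r with
      | nil =>
        have hs : w.length ≤ i + 1 := by simp at hlen; omega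
        simp [pvALoop, pvBLoop, hs]
      | cons d r' =>
        have hsz : ¬ w.length ≤ i + 1 := by
          simp only [List.length_cons] at hlen; omega
        by_cases hd : d = 'u'
        · subst hd
          have hstep : pvALoop w w.length i ('q' :: 'u' :: r') =
              pvALoop w w.length (i + 1) ('u' :: r') := by
            simp [pvALoop, hsz, hget]
          rw [hstep, ih (i + 1) hdrop']
          rw [pvBLoop_cons, pvBLoop_cons]
          norm_num [show ('u':Char) ≠ 'q' from by decide, show ('a':Char) ≤ 'u' ∧ ('u':Char) ≤ 'z' from by decide]
        · have hne : PySem.List.pyGet? w ((i : Int) + 1) ≠ some 'u' := by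
            rw [hget]; simp [hd]
          simp only [pvALoop, pvBLoop_cons, hne, hd]
          norm_num [hne, hd]
    · by_cases hr : c < 'a' ∨ 'z' < c
      · have hb : ¬ ('a' ≤ c ∧ c ≤ 'z') := by
          rcases hr with h | h
          · exact fun hc => absurd hc.1 (not_le.mpr h)
          · exact fun hc => absurd hc.2 (not_le.mpr h)
        simp only [pvALoop, pvBLoop_cons]
        simp [hr, hb, hq]
      · have hin : 'a' ≤ c ∧ c ≤ 'z' := by
          rw [not_or, not_lt, not_lt] at hr; exact ⟨hr.1, hr.2⟩
        have hstep : pvALoop w w.length i (c :: r) = pvALoop w w.length (i + 1) r := by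
          simp [pvALoop, hr, hq]
        rw [hstep, ih (i + 1) hdrop']
        rw [pvBLoop_cons]
        simp [hq, hin]

-- ===== VERDICT (by name: the statement is the Claim_ definition above) =====
theorem is_boggle_word_spec : Claim_equal_is_boggle_word := by
  intro word _
  unfold Spec_is_boggle_word is_boggle_word is_boggle_word_alt
  by_cases h : word.toList.length < 3 ∨ 17 < word.toList.length
  · rw [if_pos h, if_neg (by omega)]
  · rw [if_neg h, if_pos (by omega)]
    exact pvLoop_eq word.toList word.toList 0 (by simp)
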